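-- pv_equiv track=rewrite | github.com/leejuyong12/python-algorithm | Programmers/Lv.1/[1차]비밀지도.py | solution
-- ===== SOURCE A (Python) =====
-- def solution(n, arr1, arr2):
--     base = []
--     for i in range(n):
--         arr1_b = format(arr1[i], 'b')  # 2진수로 바꾸기
--         arr2_b = format(arr2[i], 'b')
--
--         sum_arr = str(int(arr1_b) + int(arr2_b))
--         if len(sum_arr) < n:
--             sum_arr = '0' * (n - len(sum_arr)) + sum_arr
--         k = ''
--         for j in range(n):
--             if sum_arr[j] == '0':
--                 k = k + ' '
--             else:
--                 k = k + '#'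
--         base.append(k)
--     return base
-- ===== SOURCE B (Python) =====
-- def solution(n, arr1, arr2):
--     sym = {'1': '#', '0': ' '}
--     return [''.join(sym[c] for c in format(arr1[i] | arr2[i], 'b').zfill(n)[:n]) for i in range(n)]
-- ===== Notes on version B (the rewrite author's own statement) =====
-- stated objective: idiomatic
-- what changed: Replaces A's binary-string-to-decimal addition (int(format(x,'b'))+int(format(y,'b')), manual zero padding and a char-by-char inner loop) with a single bitwise OR per row, format/zfill/[:n] and one joined dict-lookup character map; Pre_ restricts to arrays covering indices 0..n-1 whose first n entries are nonnegative bitmasks.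
-- outside the precondition, e.g. on solution(2, [-1, 3], [0, 0]): A returns ['##', '##'], B raises KeyError
import Mathlib
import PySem

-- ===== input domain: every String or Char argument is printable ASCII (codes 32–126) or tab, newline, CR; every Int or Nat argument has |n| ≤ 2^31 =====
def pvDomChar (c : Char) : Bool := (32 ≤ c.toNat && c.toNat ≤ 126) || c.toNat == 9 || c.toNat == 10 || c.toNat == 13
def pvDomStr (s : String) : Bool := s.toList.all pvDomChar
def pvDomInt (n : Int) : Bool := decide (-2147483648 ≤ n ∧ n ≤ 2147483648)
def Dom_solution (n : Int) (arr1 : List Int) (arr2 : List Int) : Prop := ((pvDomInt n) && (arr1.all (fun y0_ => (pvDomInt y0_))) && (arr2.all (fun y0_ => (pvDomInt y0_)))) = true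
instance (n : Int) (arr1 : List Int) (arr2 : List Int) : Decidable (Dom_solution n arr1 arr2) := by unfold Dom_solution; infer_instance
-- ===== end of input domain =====

-- B replaces A's decimal-addition-of-binary-strings and char-by-char row loop with a
-- per-row bitwise OR, format/zfill/[:n] and a single character translation (idiomatic, no speed claim).

-- ===== PORT A =====
-- int(s) on the strings A feeds it (output of format(·,'b'): optional '-' then digits,
-- no whitespace/underscores); ported exactly for that shape as sign + decimal-digit fold.
def pyParseDigits (cs : List Char) : Int :=
  cs.foldl (fun acc c => 10 * acc + ((c.toNat : Int) - 48)) 0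

def pyParseInt (cs : List Char) : Int :=
  if cs.head? = some '-' then -(pyParseDigits cs.tail) else pyParseDigits cs

def solution (n : Int) (arr1 : List Int) (arr2 : List Int) : List String :=
  (PySem.List.pyRange 0 n 1).foldl (fun base i =>
    let arr1_b := PySem.Int.toBinChars (PySem.List.pyGetD arr1 i 0)  -- arr1[i]; in range under Pre_
    let arr2_b := PySem.Int.toBinChars (PySem.List.pyGetD arr2 i 0)  -- arr2[i]
    let sum_arr := PySem.Int.toChars (pyParseInt arr1_b + pyParseInt arr2_b)
    let sum_arr := if (sum_arr.length : Int) < n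
      then List.replicate (n - (sum_arr.length : Int)).toNat '0' ++ sum_arr else sum_arr
    let k := (PySem.List.pyRange 0 n 1).foldl (fun k j =>
      if PySem.List.pyGetD sum_arr j ' ' = '0' then k ++ [' '] else k ++ ['#']) ([] : List Char)
    base ++ [String.ofList k]) []

-- ===== PORT B =====
def pyZfill (cs : List Char) (w : Int) : List Char :=
  let pad := List.replicate (w - (cs.length : Int)).toNat '0'
  match cs with
  | c :: rest => if c = '-' ∨ c = '+' then c :: (pad ++ rest) else pad ++ (c :: rest)
  | [] => pad

def pySym : PySem.Dict Char Char := PySem.Dict.ofList [('1', '#'), ('0', ' ')]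

-- sym[c]: a failed lookup is Python's KeyError (= none); it is never hit under Pre_,
-- so the total form keeps the char itself as the (unreachable) default
def pySymGet (c : Char) : Char := (PySem.Dict.get? pySym c).getD c

def solution_alt (n : Int) (arr1 : List Int) (arr2 : List Int) : List String :=
  (PySem.List.pyRange 0 n 1).map (fun i =>
    let v := PySem.Int.bor (PySem.List.pyGetD arr1 i 0) (PySem.List.pyGetD arr2 i 0)
    String.ofList ((PySem.List.slice (pyZfill (PySem.Int.toBinChars v) n) none (some n)).map pySymGet))

-- ===== PRECONDITION & SPEC =====
-- Pre_ requires both arrays to cover indices 0..n-1 (otherwise A raises IndexError) and restricts the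
-- first n entries to the puzzle's natural domain of nonnegative row bitmasks: on negative entries the
-- '-' sign leaks into A's decimal addition (sign/carry effects) and into B's zfill, two accidental behaviours.
def Pre_solution (n : Int) (arr1 : List Int) (arr2 : List Int) : Prop :=
  n ≤ (arr1.length : Int) ∧ n ≤ (arr2.length : Int) ∧
    (∀ x ∈ arr1.take n.toNat, 0 ≤ x) ∧ (∀ x ∈ arr2.take n.toNat, 0 ≤ x)
instance (n : Int) (arr1 : List Int) (arr2 : List Int) : Decidable (Pre_solution n arr1 arr2) := by
  unfold Pre_solution; infer_instance

def pvWitness_solution : Int × List Int × List Int := (2, [9, 20], [30, 1])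

def Spec_solution (n : Int) (arr1 : List Int) (arr2 : List Int) (out : List String) : Prop := out = solution_alt n arr1 arr2
instance (n : Int) (arr1 : List Int) (arr2 : List Int) (out : List String) : Decidable (Spec_solution n arr1 arr2 out) := by unfold Spec_solution; infer_instance

-- ===== CLAIM (what is proved, stated in full; the proofs are below) =====
def Claim_equal_solution : Prop := ∀ (n : Int) (arr1 : List Int) (arr2 : List Int), Dom_solution n arr1 arr2 → Pre_solution n arr1 arr2 → Spec_solution n arr1 arr2 (solution n arr1 arr2)

-- ===== LEMMAS AND PROOFS =====

-- decimal value of the binary digit string of m (what int(format(m,'b')) computes)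
def pvG (m : Nat) : Nat := Nat.ofDigits 10 (Nat.digits 2 m)

-- A's row-character map: '0' to ' ', any other char to '#'
def pvF0 (c : Char) : Char := if c = '0' then ' ' else '#'

theorem pv_toDigitsCore_eq (b : Nat) (hb : 2 ≤ b) :
    ∀ (f n : Nat) (l : List Char), n < f →
      Nat.toDigitsCore b f n l =
        (if n = 0 then ['0'] else ((Nat.digits b n).map Nat.digitChar).reverse) ++ l := by
  intro f
  induction f with
  | zero => intro n l h; omega
  | succ f ih =>
    intro n l h
    rw [Nat.toDigitsCore.eq_def]
    simp only
    by_cases hnb : n / b = 0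
    · rw [if_pos hnb]
      by_cases hn : n = 0
      · subst hn; simp [Nat.digitChar]
      · rw [if_neg hn]
        have hlt : n < b := by
          rcases (Nat.div_eq_zero_iff).mp hnb with h' | h'
          · omega
          · exact h'
        rw [Nat.digits_def' (by omega) (Nat.pos_of_ne_zero hn)]
        rw [Nat.div_eq_of_lt hlt, Nat.digits_zero, Nat.mod_eq_of_lt hlt]
        simp
    · rw [if_neg hnb]
      have hn : n ≠ 0 := by intro h0; subst h0; simp at hnb
      have hrec : n / b < f := by
        have h1 : n / b < n := Nat.div_lt_self (Nat.pos_of_ne_zero hn) (by omega)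
        omega
      rw [ih (n / b) _ hrec]
      rw [if_neg hnb, if_neg hn]
      rw [Nat.digits_def' (by omega) (Nat.pos_of_ne_zero hn)]
      simp

theorem pv_toDigits_eq (b n : Nat) (hb : 2 ≤ b) :
    Nat.toDigits b n = if n = 0 then ['0'] else ((Nat.digits b n).map Nat.digitChar).reverse := by
  unfold Nat.toDigits
  rw [pv_toDigitsCore_eq b hb (n + 1) n [] (by omega)]
  simp

theorem pv_digitChar_toNat (d : Nat) (hd : d < 10) : (Nat.digitChar d).toNat = 48 + d := by
  interval_cases d <;> rfl

theorem pv_parseDigits_aux (ds : List Nat) (h : ∀ d ∈ ds, d < 10) (acc : Int) :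
    ((ds.map Nat.digitChar).reverse).foldl (fun acc c => 10 * acc + ((c.toNat : Int) - 48)) acc =
      acc * 10 ^ ds.length + ((Nat.ofDigits 10 ds : Nat) : Int) := by
  induction ds generalizing acc with
  | nil => simp [Nat.ofDigits]
  | cons d ds ih =>
    simp only [List.map_cons, List.reverse_cons, List.foldl_append, List.foldl_cons, List.foldl_nil]
    rw [ih (fun x hx => h x (List.mem_cons_of_mem _ hx))]
    rw [pv_digitChar_toNat d (h d (List.mem_cons_self))]
    rw [Nat.ofDigits_cons]
    simp only [List.length_cons]
    push_cast [pow_succ]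
    ring

theorem pv_parseDigits_revmap (ds : List Nat) (h : ∀ d ∈ ds, d < 10) :
    pyParseDigits ((ds.map Nat.digitChar).reverse) = ((Nat.ofDigits 10 ds : Nat) : Int) := by
  unfold pyParseDigits
  rw [pv_parseDigits_aux ds h 0]
  simp

theorem pv_toDigits_mem (b n : Nat) (hb : 2 ≤ b) (hb' : b ≤ 10) :
    ∀ c ∈ Nat.toDigits b n, 48 ≤ c.toNat ∧ c.toNat ≤ 57 := by
  intro c hc
  rw [pv_toDigits_eq b n hb] at hc
  by_cases hn : n = 0
  · rw [if_pos hn] at hc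
    simp at hc
    subst hc; exact ⟨by decide, by decide⟩
  · rw [if_neg hn] at hc
    rw [List.mem_reverse] at hc
    obtain ⟨d, hd, rfl⟩ := List.mem_map.mp hc
    have hdb : d < b := Nat.digits_lt_base (by omega) hd
    have : d < 10 := by omega
    rw [pv_digitChar_toNat d this]
    omega

theorem pv_parse_toDigits (m : Nat) : pyParseInt (Nat.toDigits 2 m) = (pvG m : Int) := by
  have hmem := pv_toDigits_mem 2 m (by norm_num) (by norm_num)
  unfold pyParseInt
  rw [if_neg]
  · by_cases hm : m = 0
    · subst hm
      rw [pv_toDigits_eq 2 0 (by norm_num), if_pos rfl]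
      simp [pyParseDigits, pvG]
    · rw [pv_toDigits_eq 2 m (by norm_num), if_neg hm]
      rw [pv_parseDigits_revmap _ (fun d hd => by
        have := Nat.digits_lt_base (b := 2) (by norm_num) hd; omega)]
      rfl
  · intro hhead
    have hmm : '-' ∈ Nat.toDigits 2 m := by
      cases hl : Nat.toDigits 2 m with
      | nil => rw [hl] at hhead; simp at hhead
      | cons c cs => rw [hl] at hhead; simp at hhead; rw [hhead]; exact List.mem_cons_self
    have := hmem '-' hmm
    simp [Char.toNat] at this

theorem pv_g_eq (m : Nat) : pvG m = m % 2 + 10 * pvG (m / 2) := by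
  by_cases hm : m = 0
  · subst hm; simp [pvG]
  · unfold pvG
    rw [Nat.digits_def' (by norm_num) (Nat.pos_of_ne_zero hm), Nat.ofDigits_cons]

theorem pv_g_pos (m : Nat) (hm : 0 < m) : 0 < pvG m := by
  rw [pv_g_eq]
  rcases Nat.eq_zero_or_pos (m / 2) with h | h
  · have : m % 2 = 1 := by omega
    omega
  · have := pv_g_pos (m / 2) h
    omega
termination_by m
decreasing_by exact Nat.div_lt_self hm (by norm_num)

theorem pv_lor_mod_two (a b : Nat) : (a ||| b) % 2 = a % 2 ||| b % 2 := by
  have h := @Nat.or_mod_two_eq_one a b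
  have h2 : (a ||| b) % 2 < 2 := Nat.mod_lt _ (by norm_num)
  rcases Nat.mod_two_eq_zero_or_one a with h1 | h1 <;>
    rcases Nat.mod_two_eq_zero_or_one b with h3 | h3 <;> rw [h1, h3] <;>
      simp only [Nat.or_self, Nat.or_zero, Nat.zero_or] <;> rw [h1, h3] at h <;> omega

theorem pv_lor_eq_zero (a b : Nat) (h : a ||| b = 0) : a = 0 ∧ b = 0 := by
  constructor
  · by_contra ha
    have := Nat.left_le_or (n := a) (m := b)
    omega
  · by_contra hb
    have := Nat.right_le_or (n := a) (m := b)
    omega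

theorem pv_main (a b : Nat) :
    (Nat.digits 10 (pvG a + pvG b)).map (fun d => decide (d = 0)) =
      (Nat.digits 2 (a ||| b)).map (fun d => decide (d = 0)) := by
  by_cases h0 : a = 0 ∧ b = 0
  · obtain ⟨rfl, rfl⟩ := h0
    simp [pvG]
  · have hNpos : 0 < pvG a + pvG b := by
      rcases Nat.eq_zero_or_pos a with ha | ha
      · have hb : 0 < b := by omega
        have := pv_g_pos b hb; omega
      · have := pv_g_pos a ha; omega
    have hLpos : 0 < (a ||| b) := by
      rcases Nat.eq_zero_or_pos (a ||| b) with hl | hl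
      · exact absurd (pv_lor_eq_zero a b hl) h0
      · exact hl
    have hsum : pvG a + pvG b = (a % 2 + b % 2) + 10 * (pvG (a / 2) + pvG (b / 2)) := by
      rw [pv_g_eq a, pv_g_eq b]; ring
    have hd : a % 2 + b % 2 < 10 := by
      have := Nat.mod_lt a (y := 2) (by norm_num)
      have := Nat.mod_lt b (y := 2) (by norm_num)
      omega
    have hmod : (pvG a + pvG b) % 10 = a % 2 + b % 2 := by omega
    have hdiv : (pvG a + pvG b) / 10 = pvG (a / 2) + pvG (b / 2) := by omega
    rw [Nat.digits_def' (b := 10) (by norm_num) hNpos]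
    rw [Nat.digits_def' (b := 2) (by norm_num) hLpos]
    rw [hmod, hdiv, pv_lor_mod_two, Nat.or_div_two]
    simp only [List.map_cons]
    congr 1
    · rcases Nat.mod_two_eq_zero_or_one a with h1 | h1 <;>
        rcases Nat.mod_two_eq_zero_or_one b with h3 | h3 <;> rw [h1, h3] <;> rfl
    · exact pv_main (a / 2) (b / 2)
termination_by a + b
decreasing_by
  have hb2 : b / 2 ≤ b := Nat.div_le_self b 2
  have : ¬ (a = 0 ∧ b = 0) := h0
  rcases Nat.eq_zero_or_pos a with h | h
  · have : 0 < b := by omega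
    have := Nat.div_lt_self this (by norm_num : (1:Nat) < 2)
    omega
  · have := Nat.div_lt_self h (by norm_num : (1:Nat) < 2)
    omega

theorem pv_digitChar_eq_zero_iff (d : Nat) (hd : d < 10) :
    decide (Nat.digitChar d = '0') = decide (d = 0) := by
  interval_cases d <;> rfl

theorem pv_chars_zero (a b : Nat) :
    (Nat.toDigits 10 (pvG a + pvG b)).map (fun c => decide (c = '0')) =
      (Nat.toDigits 2 (a ||| b)).map (fun c => decide (c = '0')) := by
  by_cases h0 : a = 0 ∧ b = 0
  · obtain ⟨rfl, rfl⟩ := h0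
    rfl
  · have hNpos : 0 < pvG a + pvG b := by
      rcases Nat.eq_zero_or_pos a with ha | ha
      · have hb : 0 < b := by omega
        have := pv_g_pos b hb; omega
      · have := pv_g_pos a ha; omega
    have hLpos : 0 < (a ||| b) := by
      rcases Nat.eq_zero_or_pos (a ||| b) with hl | hl
      · exact absurd (pv_lor_eq_zero a b hl) h0
      · exact hl
    rw [pv_toDigits_eq 10 _ (by norm_num), pv_toDigits_eq 2 _ (by norm_num),
        if_neg (by omega), if_neg (by omega)]
    simp only [List.map_reverse, List.map_map]
    rw [List.reverse_inj]
    calc (Nat.digits 10 (pvG a + pvG b)).map ((fun c => decide (c = '0')) ∘ Nat.digitChar)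
        = (Nat.digits 10 (pvG a + pvG b)).map (fun d => decide (d = 0)) := by
          apply List.map_congr_left
          intro d hd
          exact pv_digitChar_eq_zero_iff d (Nat.digits_lt_base (by norm_num) hd)
      _ = (Nat.digits 2 (a ||| b)).map (fun d => decide (d = 0)) := pv_main a b
      _ = (Nat.digits 2 (a ||| b)).map ((fun c => decide (c = '0')) ∘ Nat.digitChar) := by
          apply List.map_congr_left
          intro d hd
          have : d < 2 := Nat.digits_lt_base (by norm_num) hd
          exact (pv_digitChar_eq_zero_iff d (by omega)).symm

theorem pv_bin_chars (m : Nat) : ∀ c ∈ Nat.toDigits 2 m, c = '0' ∨ c = '1' := by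
  intro c hc
  rw [pv_toDigits_eq 2 m (by norm_num)] at hc
  by_cases hm : m = 0
  · rw [if_pos hm] at hc; simp at hc; left; exact hc
  · rw [if_neg hm, List.mem_reverse] at hc
    obtain ⟨d, hd, rfl⟩ := List.mem_map.mp hc
    have : d < 2 := Nat.digits_lt_base (by norm_num) hd
    interval_cases d
    · left; rfl
    · right; rfl

theorem pv_rowmap (cs10 cs2 : List Char)
    (hz : cs10.map (fun c => decide (c = '0')) = cs2.map (fun c => decide (c = '0')))
    (hb : ∀ c ∈ cs2, c = '0' ∨ c = '1') :
    cs10.map pvF0 = cs2.map pySymGet := by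
  induction cs10 generalizing cs2 with
  | nil =>
    cases cs2 with
    | nil => rfl
    | cons c cs => simp at hz
  | cons c10 t10 ih =>
    cases cs2 with
    | nil => simp at hz
    | cons c2 t2 =>
      simp only [List.map_cons, List.cons.injEq] at hz ⊢
      constructor
      · rcases hb c2 List.mem_cons_self with h2 | h2
        · subst h2
          have : c10 = '0' := by
            have := hz.1
            simpa using this
          subst this; rfl
        · subst h2
          have hne : c10 ≠ '0' := by
            have := hz.1
            simpa using this
          simp only [pvF0, if_neg hne]
          decide
      · exact ih t2 hz.2 (fun c hc => hb c (List.mem_cons_of_mem _ hc))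

theorem pv_zfill_eq_pad (cs : List Char) (w : Int)
    (h : ∀ c ∈ cs, c ≠ '-' ∧ c ≠ '+') :
    pyZfill cs w = List.replicate (w - (cs.length : Int)).toNat '0' ++ cs := by
  cases cs with
  | nil => simp [pyZfill]
  | cons c rest =>
    have hc := h c List.mem_cons_self
    simp only [pyZfill]
    rw [if_neg (by tauto)]

theorem pv_pad_eq (cs : List Char) (n : Int) :
    (if (cs.length : Int) < n then List.replicate (n - (cs.length : Int)).toNat '0' ++ cs else cs) =
      List.replicate (n - (cs.length : Int)).toNat '0' ++ cs := by
  split_ifs with h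
  · rfl
  · rw [Int.toNat_of_nonpos (by omega)]
    simp

theorem pv_mapRange_take {α : Type} (cs : List Char) (n : Int) (d : Char) (f : Char → α)
    (h0 : 0 ≤ n) (h : n ≤ (cs.length : Int)) :
    (PySem.List.pyRange 0 n 1).map (fun j => f (PySem.List.pyGetD cs j d)) =
      (cs.take n.toNat).map f := by
  have hlen : (cs.take n.toNat).length = n.toNat := by
    rw [List.length_take]
    omega
  have hrange : PySem.List.pyRange 0 n 1 = PySem.List.pyRange 0 ((cs.take n.toNat).length : Int) 1 := by
    rw [hlen]
    congr 1
    omega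
  calc (PySem.List.pyRange 0 n 1).map (fun j => f (PySem.List.pyGetD cs j d))
      = (PySem.List.pyRange 0 n 1).map (fun j => f (PySem.List.pyGetD (cs.take n.toNat) j d)) := by
        apply List.map_congr_left
        intro j hj
        obtain ⟨hj0, hjn⟩ := (PySem.List.mem_pyRange_one).mp hj
        have hjlt : j < (cs.length : Int) := by omega
        have hjlt2 : j < ((cs.take n.toNat).length : Int) := by rw [hlen]; omega
        rw [PySem.List.pyGetD_eq_getElem cs d hj0 hjlt,
            PySem.List.pyGetD_eq_getElem (cs.take n.toNat) d hj0 hjlt2]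
        congr 1
        rw [List.getElem_take]
      _ = ((PySem.List.pyRange 0 n 1).map (fun j => PySem.List.pyGetD (cs.take n.toNat) j d)).map f := by
        rw [List.map_map]
        rfl
      _ = (cs.take n.toNat).map f := by
        rw [hrange, PySem.List.map_pyGetD_pyRange_zero']

theorem pv_row (n : Int) (hn : 1 ≤ n) (a b : Int) (ha : 0 ≤ a) (hb : 0 ≤ b) :
    (PySem.List.pyRange 0 n 1).foldl (fun k j =>
        if PySem.List.pyGetD
            (if ((PySem.Int.toChars (pyParseInt (PySem.Int.toBinChars a) + pyParseInt (PySem.Int.toBinChars b))).length : Int) < n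
              then List.replicate (n - ((PySem.Int.toChars (pyParseInt (PySem.Int.toBinChars a) + pyParseInt (PySem.Int.toBinChars b))).length : Int)).toNat '0' ++
                    PySem.Int.toChars (pyParseInt (PySem.Int.toBinChars a) + pyParseInt (PySem.Int.toBinChars b))
              else PySem.Int.toChars (pyParseInt (PySem.Int.toBinChars a) + pyParseInt (PySem.Int.toBinChars b)))
            j ' ' = '0' then k ++ [' '] else k ++ ['#']) ([] : List Char) =
      (PySem.List.slice (pyZfill (PySem.Int.toBinChars (PySem.Int.bor a b)) n) none (some n)).map pySymGet := by
  have hba : PySem.Int.toBinChars a = Nat.toDigits 2 a.toNat := by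
    simp [PySem.Int.toBinChars, not_lt.mpr ha]
  have hbb : PySem.Int.toBinChars b = Nat.toDigits 2 b.toNat := by
    simp [PySem.Int.toBinChars, not_lt.mpr hb]
  have hSval : pyParseInt (PySem.Int.toBinChars a) + pyParseInt (PySem.Int.toBinChars b) =
      ((pvG a.toNat + pvG b.toNat : Nat) : Int) := by
    rw [hba, hbb, pv_parse_toDigits, pv_parse_toDigits]
    push_cast
    ring
  have hcast : ∀ (m : Nat), PySem.Int.toChars (m : Int) = Nat.toDigits 10 m := fun m => by
    simp only [PySem.Int.toChars]
    rw [if_neg (by omega)]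
    simp
  have htc : PySem.Int.toChars (pyParseInt (PySem.Int.toBinChars a) + pyParseInt (PySem.Int.toBinChars b)) =
      Nat.toDigits 10 (pvG a.toNat + pvG b.toNat) := by
    rw [hSval, hcast]
  have hbor : PySem.Int.toBinChars (PySem.Int.bor a b) = Nat.toDigits 2 (a.toNat ||| b.toNat) := by
    rw [PySem.Int.bor_of_nonneg ha hb]
    simp [PySem.Int.toBinChars]
  have hzmap := pv_chars_zero a.toNat b.toNat
  have hlen : (Nat.toDigits 10 (pvG a.toNat + pvG b.toNat)).length = (Nat.toDigits 2 (a.toNat ||| b.toNat)).length := by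
    have := congrArg List.length hzmap
    simpa using this
  rw [htc, pv_pad_eq, hbor]
  set D10 := Nat.toDigits 10 (pvG a.toNat + pvG b.toNat) with hD10
  set D2 := Nat.toDigits 2 (a.toNat ||| b.toNat) with hD2
  set P10 := List.replicate (n - (D10.length : Int)).toNat '0' ++ D10 with hP10
  have hfold : (PySem.List.pyRange 0 n 1).foldl
      (fun k j => if PySem.List.pyGetD P10 j ' ' = '0' then k ++ [' '] else k ++ ['#']) ([] : List Char) =
      ([] : List Char) ++ (PySem.List.pyRange 0 n 1).map (fun j => pvF0 (PySem.List.pyGetD P10 j ' ')) := by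
    rw [show (fun (k : List Char) j => if PySem.List.pyGetD P10 j ' ' = '0' then k ++ [' '] else k ++ ['#']) =
          fun k j => k ++ [pvF0 (PySem.List.pyGetD P10 j ' ')] from
      funext fun k => funext fun j => by
        by_cases hc : PySem.List.pyGetD P10 j ' ' = '0' <;> simp [pvF0, hc]]
    exact PySem.List.foldl_append_singleton_eq_map _ _ _
  rw [hfold, List.nil_append]
  have hP10len : n ≤ (P10.length : Int) := by
    rw [hP10]
    simp only [List.length_append, List.length_replicate]
    push_cast
    omega
  rw [pv_mapRange_take P10 n ' ' pvF0 (by omega) hP10len]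
  rw [pv_zfill_eq_pad D2 n (fun c hc => by
    have h1 := pv_toDigits_mem 2 (a.toNat ||| b.toNat) (by norm_num) (by norm_num) c (by rw [← hD2]; exact hc)
    constructor <;> rintro rfl <;> revert h1 <;> decide)]
  rw [PySem.List.slice_to _ (by omega)]
  have hmain : P10.map pvF0 = (List.replicate (n - (D2.length : Int)).toNat '0' ++ D2).map pySymGet := by
    apply pv_rowmap
    · rw [hP10, List.map_append, List.map_append, List.map_replicate, List.map_replicate, hzmap, hlen]
    · intro c hc
      rcases List.mem_append.mp hc with h | h
      · left
        exact List.eq_of_mem_replicate h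
      · exact pv_bin_chars _ c h
  rw [List.map_take, List.map_take, hmain]

-- ===== VERDICT (by name: the statement is the Claim_ definition above) =====
theorem solution_spec : Claim_equal_solution := by
  intro n arr1 arr2 hdom hpre
  obtain ⟨h1, h2, h3, h4⟩ := hpre
  unfold Spec_solution
  simp only [solution, solution_alt]
  rw [PySem.List.foldl_append_singleton_eq_map]
  rw [List.nil_append]
  apply List.map_congr_left
  intro i hi
  obtain ⟨hi0, hin⟩ := PySem.List.mem_pyRange_one.mp hi
  have hn1 : (1 : Int) ≤ n := by omega
  have hmem1 : PySem.List.pyGetD arr1 i 0 ∈ arr1.take n.toNat := by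
    rw [PySem.List.pyGetD_eq_getElem arr1 0 hi0 (by omega)]
    have hlt : i.toNat < (arr1.take n.toNat).length := by
      rw [List.length_take]
      omega
    have : (arr1.take n.toNat)[i.toNat] = arr1[i.toNat] := List.getElem_take
    rw [← this]
    exact List.getElem_mem hlt
  have hmem2 : PySem.List.pyGetD arr2 i 0 ∈ arr2.take n.toNat := by
    rw [PySem.List.pyGetD_eq_getElem arr2 0 hi0 (by omega)]
    have hlt : i.toNat < (arr2.take n.toNat).length := by
      rw [List.length_take]
      omega
    have : (arr2.take n.toNat)[i.toNat] = arr2[i.toNat] := List.getElem_take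
    rw [← this]
    exact List.getElem_mem hlt
  exact congrArg String.ofList (pv_row n hn1 _ _ (h3 _ hmem1) (h4 _ hmem2))
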